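-- pv_equiv track=rewrite | github.com/rafelafrance/phenobase | phenobase/split_data.py | group_by_genus
-- ===== SOURCE A (Python) =====
-- from collections import defaultdict
--
-- def group_by_genus(records, trait):
--     by_genus = defaultdict(list)
--     for rec in records:
--         label = rec[trait].lower()
--         if not label or label not in "u01":
--             continue
--         by_genus[(rec["formatted_family"], rec["formatted_genus"])].append(label)
--
--     by_genus = dict(sorted(by_genus.items()))
--     return by_genus
-- ===== SOURCE B (Python) =====
-- def group_by_genus(records, trait):
--     kept = [
--         (rec["formatted_family"], rec["formatted_genus"], rec[trait].lower())
--         for rec in records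
--         if rec[trait].lower() and rec[trait].lower() in "u01"
--     ]
--     out = {}
--     for key in sorted({(f, g) for f, g, _ in kept}):
--         out[key] = [lab for f, g, lab in kept if (f, g) == key]
--     return out
-- ===== Notes on version B (the rewrite author's own statement) =====
-- stated objective: alternative
-- what changed: B replaces A's incremental defaultdict hash-grouping followed by a sort of the grouped items with: filter once into (family, genus, label) triples, sort the distinct key set, then collect each group's labels with one filter pass per key.
import Mathlib
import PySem

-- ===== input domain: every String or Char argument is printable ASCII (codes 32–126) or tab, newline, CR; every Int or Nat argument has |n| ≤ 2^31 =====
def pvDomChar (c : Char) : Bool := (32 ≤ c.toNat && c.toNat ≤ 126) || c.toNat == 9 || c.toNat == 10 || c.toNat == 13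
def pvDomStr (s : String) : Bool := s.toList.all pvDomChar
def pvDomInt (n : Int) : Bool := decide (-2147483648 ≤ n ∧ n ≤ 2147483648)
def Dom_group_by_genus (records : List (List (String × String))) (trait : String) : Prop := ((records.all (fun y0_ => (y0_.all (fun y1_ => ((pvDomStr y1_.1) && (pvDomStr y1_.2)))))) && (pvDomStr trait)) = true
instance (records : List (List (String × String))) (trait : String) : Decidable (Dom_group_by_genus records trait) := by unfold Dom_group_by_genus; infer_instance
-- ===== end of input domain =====

-- B replaces A's hash-grouping-then-key-sort by sorting the distinct (family, genus) keys once and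
-- collecting each group with one filter pass per key (objective: alternative, not faster).

-- rec[k] for the association-list record rec, totalised with "" (Pre_ excludes the KeyError inputs)
def pvGet (rec : List (String × String)) (k : String) : String :=
  (PySem.Dict.mk rec).getD k ""

-- ===== PORT A =====
def group_by_genus (records : List (List (String × String))) (trait : String) : List (String × String × List String) :=
  let d : PySem.Dict (String × String) (List String) :=
    records.foldl (fun d rec =>
      let label := PySem.Str.lower (pvGet rec trait)
      if label == "" || !PySem.Str.isIn label "u01" then d   -- 'if not label or label not in "u01": continue'
      else d.modify (pvGet rec "formatted_family", pvGet rec "formatted_genus") [] (fun v => v ++ [label]))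
      PySem.Dict.empty
  -- dict(sorted(by_genus.items())): dict keys are unique, so Python's tuple comparison of the
  -- items never reaches the value — exact here as a sort on the (family, genus) key components.
  (PySem.List.sorted2 d.items (fun p => p.1.1) (fun p => p.1.2)).map (fun p => (p.1.1, p.1.2, p.2))

-- ===== PORT B =====
def group_by_genus_alt (records : List (List (String × String))) (trait : String) : List (String × String × List String) :=
  let kept :=
    (records.filter (fun rec =>
        !(PySem.Str.lower (pvGet rec trait) == "") && PySem.Str.isIn (PySem.Str.lower (pvGet rec trait)) "u01")).map
      (fun rec => (pvGet rec "formatted_family", pvGet rec "formatted_genus", PySem.Str.lower (pvGet rec trait)))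
  let keys := PySem.Set.ofList (kept.map (fun t => (t.1, t.2.1)))
  -- sorted({...}) on distinct (f, g) tuples: Python's lexicographic tuple order, via sorted2.
  -- The out-dict is built by inserting the sorted DISTINCT keys in order, i.e. its items list is this map:
  (PySem.List.sorted2 keys (fun k => k.1) (fun k => k.2)).map
    (fun k => (k.1, k.2, (kept.filter (fun t => (t.1, t.2.1) == k)).map (fun t => t.2.2)))

-- ===== PRECONDITION & SPEC =====
-- Pre_ excludes exactly the inputs where A raises KeyError: a record without the trait key, or a
-- record whose label passes the filter but lacks "formatted_family"/"formatted_genus".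
def Pre_group_by_genus (records : List (List (String × String))) (trait : String) : Prop :=
  ∀ rec ∈ records,
    (PySem.Dict.mk rec).contains trait = true ∧
    ((PySem.Str.lower (pvGet rec trait) ≠ "" ∧ PySem.Str.isIn (PySem.Str.lower (pvGet rec trait)) "u01" = true) →
      (PySem.Dict.mk rec).contains "formatted_family" = true ∧ (PySem.Dict.mk rec).contains "formatted_genus" = true)
instance (records : List (List (String × String))) (trait : String) : Decidable (Pre_group_by_genus records trait) := by
  unfold Pre_group_by_genus; infer_instance

def pvWitness_group_by_genus : (List (List (String × String))) × String :=
  ([[("t", "u"), ("formatted_family", "Rosaceae"), ("formatted_genus", "Rosa")],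
    [("t", "x"), ("formatted_family", "Fabaceae"), ("formatted_genus", "Acacia")]], "t")

def Spec_group_by_genus (records : List (List (String × String))) (trait : String) (out : List (String × String × List String)) : Prop := out = group_by_genus_alt records trait
instance (records : List (List (String × String))) (trait : String) (out : List (String × String × List String)) : Decidable (Spec_group_by_genus records trait out) := by unfold Spec_group_by_genus; infer_instance

-- ===== CLAIM (what is proved, stated in full; the proofs are below) =====
def Claim_equal_group_by_genus : Prop := ∀ (records : List (List (String × String))) (trait : String), Dom_group_by_genus records trait → Pre_group_by_genus records trait → Spec_group_by_genus records trait (group_by_genus records trait)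

-- ===== LEMMAS AND PROOFS =====


-- sorted2 (Python's tuple key) is sorted under the lexicographic order on the key pair
theorem sorted2_eq_sorted_lex {α κ₁ κ₂ : Type} [LinearOrder κ₁] [LinearOrder κ₂]
    (xs : List α) (k1 : α → κ₁) (k2 : α → κ₂) :
    PySem.List.sorted2 xs k1 k2 = PySem.List.sorted xs (fun x => toLex (k1 x, k2 x)) := by
  have hb : (fun (a b : α) => decide (k1 a < k1 b) || (!decide (k1 b < k1 a) && decide (k2 a < k2 b)))
      = (fun a b => decide ((toLex (k1 a, k2 a) : Lex (κ₁ × κ₂)) < toLex (k1 b, k2 b))) := by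
    funext a b
    rcases lt_trichotomy (k1 a) (k1 b) with h | h | h
    · simp [Prod.Lex.lt_iff, h]
    · simp [Prod.Lex.lt_iff, h]
    · have h1 : ¬ k1 a < k1 b := lt_asymm h
      have h2 : k1 a ≠ k1 b := ne_of_gt h
      simp [Prod.Lex.lt_iff, h1, h2]
      intro hc
      exact absurd hc (not_le_of_gt h)
  rw [PySem.List.sorted_eq_foldl_insertBy]
  show List.foldl (fun acc x => PySem.List.insertBy
      (fun a b => decide (k1 a < k1 b) || (!decide (k1 b < k1 a) && decide (k2 a < k2 b))) x acc) [] xs = _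
  rw [hb]

-- A's defaultdict fold over key/label pairs, sorted, IS the map over the sorted distinct keys
theorem grouped_sorted_eq (pairs : List ((String × String) × String)) :
    (PySem.List.sorted2
        ((pairs.foldl (fun d p => PySem.Dict.modify d p.1 [] (fun v => v ++ [p.2])) PySem.Dict.empty).items)
        (fun p => p.1.1) (fun p => p.1.2)).map (fun p => (p.1.1, p.1.2, p.2))
    = (PySem.List.sorted2 (PySem.Set.ofList (pairs.map (fun p => p.1))) (fun k => k.1) (fun k => k.2)).map
        (fun k => (k.1, k.2, (pairs.filter (fun p => p.1 == k)).map (fun p => p.2))) := by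
  set d2 := pairs.foldl (fun d p => PySem.Dict.modify d p.1 [] (fun v => v ++ [p.2])) PySem.Dict.empty with hd2
  have hkeys : d2.keys = PySem.Set.ofList (pairs.map (fun p => p.1)) := by
    rw [hd2, PySem.Dict.keys_foldl_modify_key pairs (fun p => p.1) [] (fun _ p => fun v => v ++ [p.2]) PySem.Dict.empty,
      PySem.Dict.keys_empty, PySem.Set.update_nil_left]
  have hnd : d2.keys.Nodup := by rw [hkeys]; exact PySem.Set.nodup_ofList _
  have hitems : d2.items = (PySem.Set.ofList (pairs.map (fun p => p.1))).map
      (fun k => (k, (pairs.filter (fun p => p.1 == k)).map (fun p => p.2))) := by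
    rw [PySem.Dict.items_eq_map_keys d2 hnd [], hkeys]
    refine List.map_congr_left ?_
    intro k _
    rw [hd2, PySem.Dict.getD_foldl_modify_append, PySem.Dict.getD_empty]
    simp
  have hnods : (PySem.List.sorted (PySem.Set.ofList (pairs.map (fun p => p.1))) (fun k => (toLex (k.1, k.2) : Lex (String × String)))).Nodup :=
    ((PySem.List.sorted_perm _ _ _).nodup_iff).mpr (PySem.Set.nodup_ofList _)
  have hle : (PySem.List.sorted (PySem.Set.ofList (pairs.map (fun p => p.1))) (fun k => (toLex (k.1, k.2) : Lex (String × String)))).Pairwise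
      (fun a b => (toLex (a.1, a.2) : Lex (String × String)) ≤ toLex (b.1, b.2)) :=
    PySem.List.sorted_pairwise _ _
  have hlt : (PySem.List.sorted (PySem.Set.ofList (pairs.map (fun p => p.1))) (fun k => (toLex (k.1, k.2) : Lex (String × String)))).Pairwise
      (fun a b => (toLex (a.1, a.2) : Lex (String × String)) < toLex (b.1, b.2)) := by
    have hne : (PySem.List.sorted (PySem.Set.ofList (pairs.map (fun p => p.1))) (fun k => (toLex (k.1, k.2) : Lex (String × String)))).Pairwise
        (fun a b => a ≠ b) := hnods
    refine (hle.and hne).imp ?_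
    rintro a b ⟨h1, h2⟩
    refine lt_of_le_of_ne h1 (fun he => h2 ?_)
    have : ((a.1, a.2) : String × String) = (b.1, b.2) := by
      simpa using he
    simpa using this
  have hA : PySem.List.sorted d2.items (fun p => (toLex (p.1.1, p.1.2) : Lex (String × String)))
      = (PySem.List.sorted (PySem.Set.ofList (pairs.map (fun p => p.1))) (fun k => (toLex (k.1, k.2) : Lex (String × String)))).map
          (fun k => (k, (pairs.filter (fun p => p.1 == k)).map (fun p => p.2))) := by
    refine PySem.List.sorted_eq_of_perm_of_pairwise_lt _ _ _ ?_ ?_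
    · rw [hitems]
      exact (PySem.List.sorted_perm _ _ false).map _
    · rw [List.pairwise_map]
      exact hlt
  rw [sorted2_eq_sorted_lex, hA, sorted2_eq_sorted_lex, List.map_map]
  rfl

theorem group_by_genus_spec : Claim_equal_group_by_genus := by
  intro records trait _ _
  unfold Spec_group_by_genus group_by_genus group_by_genus_alt
  -- names for the pieces
  have hfun : (fun (d : PySem.Dict (String × String) (List String)) rec =>
      let label := PySem.Str.lower (pvGet rec trait)
      if label == "" || !PySem.Str.isIn label "u01" then d
      else d.modify (pvGet rec "formatted_family", pvGet rec "formatted_genus") [] (fun v => v ++ [label]))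
      = (fun d rec =>
        if (!(PySem.Str.lower (pvGet rec trait) == "") && PySem.Str.isIn (PySem.Str.lower (pvGet rec trait)) "u01") = true
        then d.modify (pvGet rec "formatted_family", pvGet rec "formatted_genus") [] (fun v => v ++ [PySem.Str.lower (pvGet rec trait)])
        else d) := by
    funext d rec
    cases hk : (PySem.Str.lower (pvGet rec trait) == "") <;>
      cases hi : PySem.Str.isIn (PySem.Str.lower (pvGet rec trait)) "u01" <;>
      (simp only [hk, hi]; simp)
  rw [hfun, PySem.List.foldl_if_eq_foldl_filter]
  have hmap : (records.filter (fun rec => !(PySem.Str.lower (pvGet rec trait) == "") && PySem.Str.isIn (PySem.Str.lower (pvGet rec trait)) "u01")).foldl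
        (fun d rec => PySem.Dict.modify d (pvGet rec "formatted_family", pvGet rec "formatted_genus") [] (fun v => v ++ [PySem.Str.lower (pvGet rec trait)])) PySem.Dict.empty
      = ((records.filter (fun rec => !(PySem.Str.lower (pvGet rec trait) == "") && PySem.Str.isIn (PySem.Str.lower (pvGet rec trait)) "u01")).map
          (fun rec => ((pvGet rec "formatted_family", pvGet rec "formatted_genus"), PySem.Str.lower (pvGet rec trait)))).foldl
          (fun d p => PySem.Dict.modify d p.1 [] (fun v => v ++ [p.2])) PySem.Dict.empty := by
    rw [List.foldl_map]
  rw [hmap, grouped_sorted_eq]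
  simp only [List.map_map, List.filter_map, Function.comp_def]
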